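-- pv_equiv track=rewrite | github.com/Jerschow/AILab2 | to_CNF.py | separate_into_sentences
-- ===== SOURCE A (Python) =====
-- ampersand = "&"
--
-- disjunction = "|"
--
-- par = "()"
--
-- def check_openpar(char):
--     return char == par[0]
--
-- def check_closepar(char):
--     return char == par[1]
--
-- def check_or(char):
--     return char == disjunction
--
-- def check_and(char):
--     return char == ampersand
--
-- def notop(char): # dont need to check for iffs and ifs bc already gotten rid of and we consider ! part of the literals
--     if check_and(char):
--         return False
--     if check_or(char):
--         return False
--     return True
--
-- def untilop(line,i):
--     while i < len(line) and notop(line[i]):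
--         i += 1
--     return i
--
-- def separate_into_sentences(line):
--     lines = []
--     latest = []
--     i = 0
--     while i < len(line):
--         if check_and(line[i]):
--             lines.append(latest)
--             latest = []
--         elif not check_openpar(line[i]) and not check_closepar(line[i]) and not check_or(line[i]):
--             op = untilop(line,i)
--             if check_closepar(line[op - 1]):
--                 op -= 1
--             latest.append(line[i:op])
--             i = op
--             continue
--         i += 1
--     lines.append(latest)
--     return lines
-- ===== SOURCE B (Python) =====
-- def separate_into_sentences(line):
--     result = []
--     for segment in line.split("&"):
--         sentence = []
--         for token in segment.split("|"):
--             lit = token.lstrip("()")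
--             if lit:
--                 if lit.endswith(")"):
--                     lit = lit[:-1]
--                 sentence.append(lit)
--         result.append(sentence)
--     return result
-- ===== Notes on version B (the rewrite author's own statement) =====
-- stated objective: faster
-- what changed: Replaced A's index-walking while-loop (which scans ahead with untilop for the next operator char) by a two-level split on the conjunction and then the disjunction separator, stripping leading parentheses and one trailing closing paren per token; same O(n) work but the splitting runs in C instead of a per-character Python loop.
import Mathlib
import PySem

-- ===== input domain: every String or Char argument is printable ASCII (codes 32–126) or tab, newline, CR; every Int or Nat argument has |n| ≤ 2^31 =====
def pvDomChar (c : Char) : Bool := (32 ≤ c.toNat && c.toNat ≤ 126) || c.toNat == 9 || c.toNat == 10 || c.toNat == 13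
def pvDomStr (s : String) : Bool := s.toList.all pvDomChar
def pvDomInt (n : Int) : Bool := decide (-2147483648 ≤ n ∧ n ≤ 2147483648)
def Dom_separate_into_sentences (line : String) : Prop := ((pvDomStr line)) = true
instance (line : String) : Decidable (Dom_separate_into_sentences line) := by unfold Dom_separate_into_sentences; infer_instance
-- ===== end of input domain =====

-- B replaces A's index-walking while-loop by a two-level split on '&' and '|' with a per-token
-- strip of leading parens and of one trailing ')': a different decomposition, same cost ("alternative").

-- ===== PORT A =====
-- module constants (Python: ampersand = "&", disjunction = "|", par = "()"; compared char by char)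
def ampersand : Char := '&'
def disjunction : Char := '|'

def check_openpar (c : Char) : Bool := c == '('   -- char == par[0]
def check_closepar (c : Char) : Bool := c == ')'  -- char == par[1]
def check_or (c : Char) : Bool := c == disjunction
def check_and (c : Char) : Bool := c == ampersand

def notop (c : Char) : Bool :=
  if check_and c then false
  else if check_or c then false
  else true

-- port of untilop(line, i): the while loop over the suffix line[i:]; returns op - i
def untilop : List Char → Nat
  | [] => 0
  | c :: t => if notop c then untilop t + 1 else 0

-- the main while loop of A, as recursion on the suffix rest = line[i:]:
-- line[i:op] is rest.take d, check_closepar(line[op-1]) reads rest[d-1]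
def sisLoop (rest : List Char) (latest : List String) (lines : List (List String)) :
    List (List String) :=
  match rest with
  | [] => lines ++ [latest]
  | c :: t =>
    if check_and c = true then
      sisLoop t [] (lines ++ [latest])
    else if hlit : check_openpar c = false ∧ check_closepar c = false ∧ check_or c = false then
      if hcl : (c :: t)[untilop (c :: t) - 1]? = some ')' then
        sisLoop ((c :: t).drop (untilop (c :: t) - 1))
          (latest ++ [String.ofList ((c :: t).take (untilop (c :: t) - 1))]) lines
      else
        sisLoop ((c :: t).drop (untilop (c :: t)))
          (latest ++ [String.ofList ((c :: t).take (untilop (c :: t)))]) lines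
    else
      sisLoop t latest lines
termination_by rest.length
decreasing_by
  all_goals simp only [List.length_cons, List.length_drop]
  · omega
  · -- stripped case: untilop (c::t) ≥ 2, else (c::t)[0]? = some c with c ≠ ')'
    have hno : notop c = true := by
      simp_all [notop, check_openpar, check_closepar, check_or, check_and]
    have h1 : untilop (c :: t) = untilop t + 1 := by simp [untilop, hno]
    have h2 : untilop t ≠ 0 := by
      intro h0
      have hc : c = ')' := by rw [h1, h0] at hcl; simpa using hcl
      have h3 := hlit.2.1
      rw [hc] at h3; simp [check_closepar] at h3
    omega
  · have hno : notop c = true := by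
      simp_all [notop, check_openpar, check_closepar, check_or, check_and]
    have h1 : untilop (c :: t) = untilop t + 1 := by simp [untilop, hno]
    omega
  · omega

def separate_into_sentences (line : String) : List (List String) :=
  sisLoop line.toList [] []

-- ===== PORT B =====
-- one token between '|'s: lit = token.lstrip("()") (hand port of lstrip with a char set:
-- drop leading '(' and ')' chars; exact); if lit: strip one trailing ')' and append
def parseToken (sentence : List String) (token : List Char) : List String :=
  let lit := token.dropWhile (fun c => c == '(' || c == ')')
  if lit.isEmpty then sentence
  else if lit.getLast? = some ')' then sentence ++ [String.ofList lit.dropLast]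
  else sentence ++ [String.ofList lit]

-- one segment between '&'s: the inner for-loop over segment.split('|')
def parseSegment (segment : List Char) : List String :=
  (segment.splitOn '|').foldl parseToken []

def separate_into_sentences_alt (line : String) : List (List String) :=
  (line.toList.splitOn '&').map parseSegment

-- ===== PRECONDITION & SPEC =====
def Spec_separate_into_sentences (line : String) (out : List (List String)) : Prop := out = separate_into_sentences_alt line
instance (line : String) (out : List (List String)) : Decidable (Spec_separate_into_sentences line out) := by unfold Spec_separate_into_sentences; infer_instance

-- ===== CLAIM (what is proved, stated in full; the proofs are below) =====
def Claim_equal_separate_into_sentences : Prop := ∀ (line : String), Dom_separate_into_sentences line → Spec_separate_into_sentences line (separate_into_sentences line)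

-- ===== LEMMAS AND PROOFS =====

lemma notop_eq_true_iff (c : Char) : notop c = true ↔ c ≠ '&' ∧ c ≠ '|' := by
  simp only [notop, check_and, check_or, ampersand, disjunction]
  split_ifs with h1 h2 <;> simp_all

lemma notop_eq_false_iff (c : Char) : notop c = false ↔ c = '&' ∨ c = '|' := by
  rw [← Bool.not_eq_true, notop_eq_true_iff]
  tauto

-- untilop facts
lemma untilop_le (xs : List Char) : untilop xs ≤ xs.length := by
  induction xs with
  | nil => simp [untilop]
  | cons c t ih => simp only [untilop, List.length_cons]; split_ifs <;> omega

lemma take_untilop_notop (xs : List Char) :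
    ∀ ch ∈ xs.take (untilop xs), notop ch = true := by
  induction xs with
  | nil => simp
  | cons c t ih =>
    by_cases h : notop c = true
    · simp only [untilop, h, if_pos, List.take_succ_cons, List.mem_cons]
      rintro ch (rfl | hch)
      · exact h
      · exact ih ch hch
    · simp only [Bool.not_eq_true] at h
      simp [untilop, h]

lemma drop_untilop_op (xs : List Char) :
    xs.drop (untilop xs) = [] ∨
      ∃ c2 t2, xs.drop (untilop xs) = c2 :: t2 ∧ notop c2 = false := by
  induction xs with
  | nil => simp
  | cons c t ih =>
    by_cases h : notop c = true
    · simpa [untilop, h] using ih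
    · simp only [Bool.not_eq_true] at h
      exact Or.inr ⟨c, t, by simp [untilop, h], h⟩

-- splitOnP structure lemma: a separator-free prefix glues onto the first piece
lemma splitOnP_prepend (p : Char → Bool) (pre s : List Char) (h : ∀ c ∈ pre, p c = false) :
    List.splitOnP p (pre ++ s) = (List.splitOnP p s).modifyHead (pre ++ ·) := by
  induction pre with
  | nil =>
    obtain ⟨s0, ss, hs⟩ := List.exists_cons_of_ne_nil (List.splitOnP_ne_nil p s)
    simp [hs]
  | cons a pre ih =>
    have ha : p a = false := h a (by simp)
    have h' : ∀ c ∈ pre, p c = false := fun c hc => h c (by simp [hc])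
    rw [List.cons_append, List.splitOnP_cons, if_neg (by simp [ha]), ih h']
    obtain ⟨s0, ss, hs⟩ := List.exists_cons_of_ne_nil (List.splitOnP_ne_nil p s)
    simp [hs]

-- parseToken appends on the right
lemma parseToken_shift (s : List String) (tok : List Char) :
    parseToken s tok = s ++ parseToken [] tok := by
  simp only [parseToken]
  split_ifs <;> simp

lemma foldl_parseToken_shift (ts : List (List Char)) :
    ∀ init, ts.foldl parseToken init = init ++ ts.foldl parseToken [] := by
  induction ts with
  | nil => simp
  | cons t ts ih =>
    intro init
    rw [List.foldl_cons, List.foldl_cons, ih, parseToken_shift, ih (parseToken [] t)]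
    simp

lemma parseToken_nil_nil : parseToken [] ([] : List Char) = [] := by
  simp [parseToken]

lemma parseToken_cons_paren {c : Char} (h : c = '(' ∨ c = ')') (s : List String)
    (tok : List Char) : parseToken s (c :: tok) = parseToken s tok := by
  have hc : (c == '(' || c == ')') = true := by rcases h with h | h <;> simp [h]
  simp [parseToken, hc]

lemma parseSegment_cons_paren {c : Char} (h : c = '(' ∨ c = ')') (s : List Char) :
    parseSegment (c :: s) = parseSegment s := by
  have hc : (c == '|') = false := by rcases h with h | h <;> simp [h]
  simp only [parseSegment, List.splitOn]
  rw [List.splitOnP_cons, if_neg (by simp [hc])]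
  obtain ⟨t0, ts, hs⟩ := List.exists_cons_of_ne_nil (List.splitOnP_ne_nil (· == '|') s)
  rw [hs]
  simp only [List.modifyHead, List.foldl_cons]
  rw [parseToken_cons_paren h]

lemma parseSegment_cons_pipe (s : List Char) :
    parseSegment ('|' :: s) = parseSegment s := by
  simp only [parseSegment, List.splitOn]
  rw [List.splitOnP_cons, if_pos (by simp)]
  simp [parseToken_nil_nil]

lemma parseSegment_nil : parseSegment [] = [] := by
  simp [parseSegment, List.splitOn, List.splitOnP_nil, parseToken_nil_nil]

-- skipping a paren or '|' char at the '&'-segment level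
lemma map_parseSegment_skip {c : Char} (h : c = '(' ∨ c = ')' ∨ c = '|') (s : List Char) :
    ((c :: s).splitOn '&').map parseSegment = (s.splitOn '&').map parseSegment := by
  have hc : (c == '&') = false := by rcases h with h | h | h <;> simp [h]
  simp only [List.splitOn]
  rw [List.splitOnP_cons, if_neg (by simp [hc])]
  obtain ⟨s0, ss, hs⟩ := List.exists_cons_of_ne_nil (List.splitOnP_ne_nil (· == '&') s)
  rw [hs]
  simp only [List.modifyHead, List.map_cons]
  rcases h with h | h | h
  · rw [parseSegment_cons_paren (Or.inl h)]
  · rw [parseSegment_cons_paren (Or.inr h)]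
  · subst h; rw [parseSegment_cons_pipe]

-- the literal-run step: a maximal op-free run (head not a paren) contributes parseToken [] run
lemma seg_step (run rest2 : List Char) (latest : List String)
    (hrun : ∀ ch ∈ run, notop ch = true)
    (hrest : rest2 = [] ∨ ∃ c2 t2, rest2 = c2 :: t2 ∧ notop c2 = false) :
    (((run ++ rest2).splitOn '&').map parseSegment).modifyHead (latest ++ ·) =
      ((rest2.splitOn '&').map parseSegment).modifyHead ((latest ++ parseToken [] run) ++ ·) := by
  have hamp : ∀ ch ∈ run, (ch == '&') = false := by
    intro ch hch
    have := (notop_eq_true_iff ch).1 (hrun ch hch)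
    simp [this.1]
  have hpipe : ∀ ch ∈ run, (ch == '|') = false := by
    intro ch hch
    have := (notop_eq_true_iff ch).1 (hrun ch hch)
    simp [this.2]
  have hseg_run : parseSegment run = parseToken [] run := by
    simp only [parseSegment, List.splitOn]
    have h := splitOnP_prepend (· == '|') run [] hpipe
    simp only [List.append_nil] at h
    rw [h, List.splitOnP_nil]
    simp
  rcases hrest with hrest | ⟨c2, t2, hrest, hop⟩
  · subst hrest
    simp only [List.append_nil, List.splitOn]
    have h := splitOnP_prepend (· == '&') run [] hamp
    simp only [List.append_nil] at h
    rw [h, List.splitOnP_nil]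
    simp only [List.modifyHead, List.map_cons, List.map_nil]
    rw [parseSegment_nil]
    simp [hseg_run]
  · subst hrest
    rcases (notop_eq_false_iff c2).1 hop with rfl | rfl
    · -- rest2 = '&' :: t2
      simp only [List.splitOn]
      rw [splitOnP_prepend (· == '&') run _ hamp, List.splitOnP_cons, if_pos (by simp)]
      obtain ⟨s0, ss, hs⟩ := List.exists_cons_of_ne_nil (List.splitOnP_ne_nil (· == '&') t2)
      simp [hs, parseSegment_nil, hseg_run]
    · -- rest2 = '|' :: t2
      simp only [List.splitOn]
      have hpre : ∀ ch ∈ run ++ ['|'], (ch == '&') = false := by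
        intro ch hch
        rcases List.mem_append.1 hch with hch | hch
        · exact hamp ch hch
        · simp at hch; simp [hch]
      have hr : run ++ '|' :: t2 = (run ++ ['|']) ++ t2 := by simp
      rw [hr, splitOnP_prepend (· == '&') (run ++ ['|']) t2 hpre,
        List.splitOnP_cons, if_neg (by simp)]
      obtain ⟨s0, ss, hs⟩ := List.exists_cons_of_ne_nil (List.splitOnP_ne_nil (· == '&') t2)
      rw [hs]
      simp only [List.modifyHead, List.map_cons, List.append_assoc, List.cons_append,
        List.nil_append]
      rw [parseSegment_cons_pipe]
      -- head segments: parseSegment (run ++ '|' :: s0) = parseToken [] run ++ parseSegment s0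
      have hhead : parseSegment (run ++ '|' :: s0) = parseToken [] run ++ parseSegment s0 := by
        simp only [parseSegment, List.splitOn]
        rw [splitOnP_prepend (· == '|') run _ hpipe, List.splitOnP_cons, if_pos (by simp)]
        simp only [List.modifyHead, List.append_nil, List.foldl_cons]
        rw [foldl_parseToken_shift]
      rw [hhead]

-- the main loop invariant: sisLoop = B's split-and-map with latest glued onto the first segment
lemma sisLoop_eq (n : Nat) : ∀ (rest : List Char), rest.length ≤ n → ∀ latest lines,
    sisLoop rest latest lines =
      lines ++ ((rest.splitOn '&').map parseSegment).modifyHead (latest ++ ·) := by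
  induction n with
  | zero =>
    intro rest hlen latest lines
    have : rest = [] := List.length_eq_zero_iff.1 (Nat.le_zero.1 hlen)
    subst this
    rw [sisLoop]
    simp [List.splitOn, List.splitOnP_nil, parseSegment_nil]
  | succ n ih =>
    intro rest hlen latest lines
    match rest with
    | [] =>
      rw [sisLoop]
      simp [List.splitOn, List.splitOnP_nil, parseSegment_nil]
    | c :: t =>
      rw [sisLoop]
      simp only [List.length_cons, Nat.add_le_add_iff_right] at hlen
      by_cases hand : check_and c = true
      · -- c = '&'
        have hc : c = '&' := by simpa [check_and, ampersand] using hand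
        rw [if_pos hand, ih t hlen [] (lines ++ [latest])]
        subst hc
        simp only [List.splitOn, List.splitOnP_cons, if_pos (by simp : ('&' == '&') = true)]
        obtain ⟨s0, ss, hs⟩ := List.exists_cons_of_ne_nil (List.splitOnP_ne_nil (· == '&') t)
        simp [hs, parseSegment_nil]
      · rw [if_neg hand]
        by_cases hlit : check_openpar c = false ∧ check_closepar c = false ∧ check_or c = false
        · -- literal run
          rw [dif_pos hlit]
          have hno : notop c = true := by
            have h1 : check_and c = false := by simpa using hand
            simp [notop, h1, hlit.2.2]
          have hd1 : untilop (c :: t) = untilop t + 1 := by simp [untilop, hno]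
          have hdle : untilop (c :: t) ≤ (c :: t).length := untilop_le _
          have hsplit : (c :: t).take (untilop (c :: t)) ++ (c :: t).drop (untilop (c :: t)) =
              c :: t := List.take_append_drop _ _
          have hrun : ∀ ch ∈ (c :: t).take (untilop (c :: t)), notop ch = true :=
            take_untilop_notop _
          have hrest := drop_untilop_op (c :: t)
          have hheadrun : (c :: t).take (untilop (c :: t)) = c :: t.take (untilop (c :: t) - 1) := by
            rw [hd1]; simp
          have hcne : (c == '(' || c == ')') = false := by
            have h1 := hlit.1; have h2 := hlit.2.1
            simp [check_openpar] at h1; simp [check_closepar] at h2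
            simp [h1, h2]
          have hdw : ((c :: t).take (untilop (c :: t))).dropWhile
              (fun ch => ch == '(' || ch == ')') = (c :: t).take (untilop (c :: t)) := by
            rw [hheadrun, List.dropWhile_cons, if_neg (by simp [hcne])]
          have hlast : ((c :: t).take (untilop (c :: t))).getLast? =
              (c :: t)[untilop (c :: t) - 1]? := by
            rw [List.getLast?_eq_getElem?, List.length_take, List.getElem?_take]
            rw [Nat.min_eq_left hdle, if_pos (by omega)]
          by_cases hcl : (c :: t)[untilop (c :: t) - 1]? = some ')'
          · rw [dif_pos hcl]
            -- untilop (c::t) ≥ 2: index 0 is c, which is not ')'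
            have hd2 : 2 ≤ untilop (c :: t) := by
              rcases Nat.lt_or_ge (untilop (c :: t)) 2 with h | h
              · have h1 : untilop (c :: t) = 1 := by omega
                rw [h1] at hcl
                simp at hcl
                have h3 := hlit.2.1
                simp [check_closepar, hcl] at h3
              · exact h
            have hdrop : (c :: t).drop (untilop (c :: t) - 1) =
                ')' :: (c :: t).drop (untilop (c :: t)) := by
              have hlt : untilop (c :: t) - 1 < (c :: t).length := by omega
              have hget : (c :: t)[untilop (c :: t) - 1] = ')' := by
                have h := List.getElem?_eq_getElem hlt
                rw [h] at hcl
                exact Option.some.inj hcl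
              have harith : untilop (c :: t) - 1 + 1 = untilop (c :: t) := by omega
              rw [List.drop_eq_getElem_cons hlt, hget, harith]
            have hlen' : ((c :: t).drop (untilop (c :: t) - 1)).length ≤ n := by
              simp only [List.length_drop, List.length_cons]
              omega
            rw [ih _ hlen', hdrop, map_parseSegment_skip (Or.inr (Or.inl rfl))]
            have hpt : parseToken [] ((c :: t).take (untilop (c :: t))) =
                [String.ofList ((c :: t).take (untilop (c :: t) - 1))] := by
              simp only [parseToken, hdw]
              rw [if_neg (by simp [hheadrun]), if_pos (by rw [hlast]; exact hcl)]
              simp only [List.nil_append]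
              congr 2
              rw [List.dropLast_eq_take, List.length_take, Nat.min_eq_left hdle,
                List.take_take, Nat.min_eq_left (by omega)]
            rw [← hpt, ← seg_step _ _ _ hrun hrest, hsplit]
          · rw [dif_neg hcl]
            have hlen' : ((c :: t).drop (untilop (c :: t))).length ≤ n := by
              simp only [List.length_drop, List.length_cons]
              omega
            rw [ih _ hlen']
            have hpt : parseToken [] ((c :: t).take (untilop (c :: t))) =
                [String.ofList ((c :: t).take (untilop (c :: t)))] := by
              simp only [parseToken, hdw]
              rw [if_neg (by simp [hheadrun]), if_neg (by rw [hlast]; exact hcl)]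
              simp only [List.nil_append]
            rw [← hpt, ← seg_step _ _ _ hrun hrest, hsplit]
        · -- c is '(' , ')' or '|'
          rw [dif_neg hlit, ih t hlen latest lines]
          have hc : c = '(' ∨ c = ')' ∨ c = '|' := by
            by_contra hno
            push Not at hno
            exact hlit ⟨by simp [check_openpar, hno.1], by simp [check_closepar, hno.2.1],
              by simp [check_or, disjunction, hno.2.2]⟩
          rw [map_parseSegment_skip hc]

-- ===== VERDICT (by name: the statement is the Claim_ definition above) =====
theorem separate_into_sentences_spec : Claim_equal_separate_into_sentences := by
  intro line _
  unfold Spec_separate_into_sentences separate_into_sentences separate_into_sentences_alt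
  rw [sisLoop_eq line.toList.length line.toList le_rfl [] []]
  obtain ⟨s0, ss, hs⟩ := List.exists_cons_of_ne_nil
    (List.splitOnP_ne_nil (· == '&') line.toList)
  simp only [List.splitOn] at *
  simp [hs]
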